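-- pv_equiv track=rewrite | github.com/GGN-2015/parse_string_with_brace | xulang/__main__.py | check_and_erase
-- ===== SOURCE A (Python) =====
-- def check_and_erase(argv_list:list[str], aim_str:str) -> tuple[list[str], bool]:
--     ans = aim_str in argv_list
--     new_argv_list = [
--         item
--         for item in argv_list
--         if item != aim_str
--     ]
--     return new_argv_list, ans
-- ===== SOURCE B (Python) =====
-- def check_and_erase(argv_list, aim_str):
--     new_argv_list = []
--     ans = False
--     for item in argv_list:
--         if item == aim_str:
--             ans = True
--         else:
--             new_argv_list.append(item)
--     return new_argv_list, ans
-- ===== Notes on version B (the rewrite author's own statement) =====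
-- stated objective: alternative
-- what changed: Replaces the membership test plus a separate filtering comprehension (two passes) with one explicit loop that maintains the filtered list and the presence flag together in a single traversal.
import Mathlib
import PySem

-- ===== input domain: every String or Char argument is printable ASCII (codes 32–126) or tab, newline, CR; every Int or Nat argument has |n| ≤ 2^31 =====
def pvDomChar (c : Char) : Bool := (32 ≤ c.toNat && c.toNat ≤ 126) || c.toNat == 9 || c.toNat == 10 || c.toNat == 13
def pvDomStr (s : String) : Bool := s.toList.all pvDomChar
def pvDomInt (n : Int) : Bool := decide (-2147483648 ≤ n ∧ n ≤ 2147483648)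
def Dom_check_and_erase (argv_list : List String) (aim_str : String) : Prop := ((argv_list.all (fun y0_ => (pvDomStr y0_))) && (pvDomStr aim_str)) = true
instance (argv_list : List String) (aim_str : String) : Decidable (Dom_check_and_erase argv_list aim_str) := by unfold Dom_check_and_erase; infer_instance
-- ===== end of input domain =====

-- B fuses A's membership test and filtering comprehension into one explicit loop (alternative decomposition, same cost).

-- ===== PORT A =====
def check_and_erase (argv_list : List String) (aim_str : String) : List String × Bool :=
  let ans := argv_list.contains aim_str
  let new_argv_list := argv_list.filter (fun item => item ≠ aim_str)
  (new_argv_list, ans)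

-- ===== PORT B =====
def check_and_erase_alt (argv_list : List String) (aim_str : String) : List String × Bool :=
  argv_list.foldl
    (fun (st : List String × Bool) item =>
      if item == aim_str then (st.1, true) else (st.1 ++ [item], st.2))
    ([], false)

-- ===== PRECONDITION & SPEC =====
def Spec_check_and_erase (argv_list : List String) (aim_str : String) (out : List String × Bool) : Prop := out = check_and_erase_alt argv_list aim_str
instance (argv_list : List String) (aim_str : String) (out : List String × Bool) : Decidable (Spec_check_and_erase argv_list aim_str out) := by unfold Spec_check_and_erase; infer_instance

-- ===== CLAIM (what is proved, stated in full; the proofs are below) =====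
def Claim_equal_check_and_erase : Prop := ∀ (argv_list : List String) (aim_str : String), Dom_check_and_erase argv_list aim_str → Spec_check_and_erase argv_list aim_str (check_and_erase argv_list aim_str)

-- ===== LEMMAS AND PROOFS =====

theorem check_and_erase_alt_invariant (argv_list : List String) (aim_str : String)
    (acc : List String) (b : Bool) :
    argv_list.foldl
      (fun (st : List String × Bool) item =>
        if item == aim_str then (st.1, true) else (st.1 ++ [item], st.2))
      (acc, b)
    = (acc ++ argv_list.filter (fun item => item ≠ aim_str),
       b || argv_list.contains aim_str) := by
  induction argv_list generalizing acc b with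
  | nil => simp
  | cons x xs ih =>
    simp only [List.foldl_cons, List.filter_cons, List.contains_cons]
    by_cases h : x = aim_str
    · simp only [h, beq_self_eq_true, if_true, ih, Bool.or_true, Bool.true_or,
        decide_not, decide_eq_true_eq]
      simp
    · have hne : (x == aim_str) = false := by simp [h]
      simp only [hne, Bool.false_eq_true, if_false, ih]
      have h2 : (aim_str == x) = false := by simp [Ne.symm h]
      simp [h, h2, Bool.or_assoc]

-- ===== VERDICT (by name: the statement is the Claim_ definition above) =====
theorem check_and_erase_spec : Claim_equal_check_and_erase := by
  intro argv_list aim_str _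
  unfold Spec_check_and_erase check_and_erase check_and_erase_alt
  rw [check_and_erase_alt_invariant]
  simp
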